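-- pv_equiv track=rewrite | github.com/OnMyWave/Algorithm | Programmers/스킬트리.py | solution
-- ===== SOURCE A (Python) =====
-- from collections import deque
--
-- def solution(skill, skill_trees):
--     answer = 0
--     for skill_tree in skill_trees:
--         available = True
--         queue = deque([i for i in skill])
--
--         for s in skill_tree:
--             if s in queue:
--                 if queue.popleft() != s:
--                     available = False
--                     break
--         if available :
--             answer += 1
--     return answer
-- ===== SOURCE B (Python) =====
-- def solution(skill, skill_trees):
--     answer = 0
--     for tree in skill_trees:
--         seen = []
--         for c in tree:
--             if c in skill and c not in seen:
--                 seen.append(c)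
--         if skill.startswith(''.join(seen)):
--             answer += 1
--     return answer
-- ===== Notes on version B (the rewrite author's own statement) =====
-- stated objective: simpler
-- what changed: Replaces the per-character deque consumption with an ordered dedup of each tree's skill characters followed by a single prefix comparison against skill; no queue state is threaded through the scan.
-- outside the precondition, e.g. on solution('AAB', ['AAB']): A returns 1, B returns 0
import Mathlib
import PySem

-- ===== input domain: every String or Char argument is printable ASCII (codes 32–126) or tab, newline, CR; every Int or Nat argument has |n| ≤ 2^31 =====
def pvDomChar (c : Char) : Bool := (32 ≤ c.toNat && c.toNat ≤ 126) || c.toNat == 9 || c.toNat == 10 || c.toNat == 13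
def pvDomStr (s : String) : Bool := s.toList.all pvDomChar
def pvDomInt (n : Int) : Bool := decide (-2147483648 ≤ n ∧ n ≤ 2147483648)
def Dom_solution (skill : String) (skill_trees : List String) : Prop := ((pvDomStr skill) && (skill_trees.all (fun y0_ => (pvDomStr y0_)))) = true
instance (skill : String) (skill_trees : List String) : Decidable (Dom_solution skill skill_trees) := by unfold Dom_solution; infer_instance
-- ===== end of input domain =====

-- B replaces A's per-character deque consumption with an ordered dedup of each tree's
-- skill characters followed by one prefix comparison against skill (objective: simpler).

-- ===== PORT A =====
-- inner loop of A: queue of not-yet-learned skill chars, scanned against the tree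
def solLoopA : List Char → List Char → Bool
  | _, [] => true
  | queue, s :: rest =>
    if queue.contains s then
      match queue with
      | [] => true           -- unreachable: contains on [] is false
      | q :: qs => if q ≠ s then false else solLoopA qs rest
    else solLoopA queue rest

def solution (skill : String) (skill_trees : List String) : Int :=
  skill_trees.foldl
    (fun answer tree =>
      if solLoopA skill.toList tree.toList then answer + 1 else answer) 0

-- ===== PORT B =====
-- B's inner pass: ordered dedup of the tree's characters that occur in skill
def solSeenB (skill : List Char) : List Char → List Char → List Char
  | seen, [] => seen
  | seen, c :: rest =>
    if skill.contains c && !(seen.contains c)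
    then solSeenB skill (seen ++ [c]) rest
    else solSeenB skill seen rest

def solution_alt (skill : String) (skill_trees : List String) : Int :=
  skill_trees.foldl
    (fun answer tree =>
      if (solSeenB skill.toList [] tree.toList).isPrefixOf skill.toList
      then answer + 1 else answer) 0

-- ===== PRECONDITION & SPEC =====
-- Pre_ excludes skills with a repeated character (the problem's skills are distinct);
-- there A's deque re-offers a duplicate letter and its count is an accidental corner
-- (e.g. skill "AAB": A accepts tree "AAB", B's prefix check does not).
def Pre_solution (skill : String) (skill_trees : List String) : Prop :=
  skill.toList.Nodup
instance (skill : String) (skill_trees : List String) : Decidable (Pre_solution skill skill_trees) := by unfold Pre_solution; infer_instance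

def pvWitness_solution : String × List String := ("CBD", ["BACDE", "CBADF", "CBD"])

def Spec_solution (skill : String) (skill_trees : List String) (out : Int) : Prop := out = solution_alt skill skill_trees
instance (skill : String) (skill_trees : List String) (out : Int) : Decidable (Spec_solution skill skill_trees out) := by unfold Spec_solution; infer_instance

-- ===== CLAIM (what is proved, stated in full; the proofs are below) =====
def Claim_equal_solution : Prop := ∀ (skill : String) (skill_trees : List String), Dom_solution skill skill_trees → Pre_solution skill skill_trees → Spec_solution skill skill_trees (solution skill skill_trees)

-- ===== LEMMAS AND PROOFS =====

-- solSeenB only appends to its accumulator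
lemma solSeenB_append (S : List Char) :
    ∀ (t seen : List Char), ∃ ext, solSeenB S seen t = seen ++ ext := by
  intro t
  induction t with
  | nil => exact fun seen => ⟨[], by simp [solSeenB]⟩
  | cons c rest ih =>
    intro seen
    by_cases h : (S.contains c && !(seen.contains c)) = true
    · obtain ⟨e, he⟩ := ih (seen ++ [c])
      refine ⟨[c] ++ e, ?_⟩
      simp only [solSeenB]
      rw [if_pos h, he, List.append_assoc]
    · obtain ⟨e, he⟩ := ih seen
      refine ⟨e, ?_⟩
      simp only [solSeenB]
      rw [if_neg h, he]

-- a prefix of S that extends S.take k determines S[k]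
lemma prefix_extend_char (S : List Char) (k : Nat) (hk : k < S.length)
    (c : Char) (ext : List Char)
    (hp : ((S.take k ++ [c]) ++ ext).isPrefixOf S = true) : c = S[k] := by
  rw [List.isPrefixOf_iff_prefix] at hp
  obtain ⟨r, hr⟩ := hp
  rw [List.append_assoc, List.append_assoc] at hr
  have hlen : (S.take k).length = k := by simp [List.length_take]; omega
  have hopt : S[k]? = some c := by
    conv_lhs => rw [← hr]
    rw [List.getElem?_append_right (by omega)]
    simp [hlen]
  rw [List.getElem?_eq_getElem hk] at hopt
  exact (Option.some_injective _ hopt).symm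

-- membership in the remaining queue vs. "in skill and not yet seen"
lemma contains_drop_eq (S : List Char) (hN : S.Nodup) (k : Nat) (c : Char) :
    (S.drop k).contains c = (S.contains c && !((S.take k).contains c)) := by
  have h : S.take k ++ S.drop k = S := List.take_append_drop k S
  have hN' : (S.take k ++ S.drop k).Nodup := by rw [h]; exact hN
  have hdisj := (List.nodup_append.mp hN').2.2
  by_cases hd : c ∈ S.drop k
  · have hnt : c ∉ S.take k := fun ht => hdisj _ ht _ hd rfl
    have hs : c ∈ S := by rw [← h]; exact List.mem_append.mpr (Or.inr hd)
    simp [hd, hnt, hs]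
  · by_cases ht : c ∈ S.take k
    · simp [hd, ht]
    · have hs : c ∉ S := by
        rw [← h]; intro hc
        rcases List.mem_append.mp hc with h1 | h2
        exacts [ht h1, hd h2]
      simp [hd, ht, hs]

-- main per-tree invariant: queue = S.drop k, accumulated seen = S.take k
lemma solLoop_key (S : List Char) (hN : S.Nodup) :
    ∀ (t : List Char) (k : Nat), k ≤ S.length →
      solLoopA (S.drop k) t = (solSeenB S (S.take k) t).isPrefixOf S := by
  intro t
  induction t with
  | nil =>
    intro k hk
    simp [solLoopA, solSeenB, List.isPrefixOf_iff_prefix, List.take_prefix]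
  | cons c rest ih =>
    intro k hk
    rw [show solLoopA (S.drop k) (c :: rest) =
        (if (S.drop k).contains c then
          match S.drop k with
          | [] => true
          | q :: qs => if q ≠ c then false else solLoopA qs rest
        else solLoopA (S.drop k) rest) from rfl]
    rw [show solSeenB S (S.take k) (c :: rest) =
        (if S.contains c && !((S.take k).contains c)
         then solSeenB S (S.take k ++ [c]) rest
         else solSeenB S (S.take k) rest) from rfl]
    rw [← contains_drop_eq S hN k c]
    by_cases hmem : (S.drop k).contains c = true
    · have hne : S.drop k ≠ [] := by
        intro h0; rw [h0] at hmem; simp at hmem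
      have hklt : k < S.length := by
        by_contra h
        exact hne (List.drop_eq_nil_of_le (by omega))
      have hdrop : S.drop k = S[k] :: S.drop (k + 1) :=
        List.drop_eq_getElem_cons hklt
      rw [if_pos hmem, if_pos hmem, hdrop]
      rw [show (match S[k] :: S.drop (k + 1) with
          | [] => true
          | q :: qs => if q ≠ c then false else solLoopA qs rest) =
          (if S[k] ≠ c then false else solLoopA (S.drop (k + 1)) rest) from rfl]
      by_cases heq : S[k] = c
      · rw [if_neg (by simp [heq])]
        have htake : S.take k ++ [c] = S.take (k + 1) := by
          rw [List.take_add_one]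
          simp [List.getElem?_eq_getElem hklt, heq]
        rw [htake]
        simpa using ih (k + 1) (by omega)
      · rw [if_pos (by simp [heq])]
        -- B side must be false: its result extends take k ++ [c], not a prefix of S
        obtain ⟨ext, hext⟩ := solSeenB_append S rest (S.take k ++ [c])
        rw [hext]
        by_contra hb
        simp only [eq_comm (a := false)] at hb
        rw [Bool.not_eq_false] at hb
        exact heq (prefix_extend_char S k hklt c ext hb).symm
    · rw [if_neg hmem, if_neg hmem]
      exact ih k hk

lemma solLoop_zero (S : List Char) (hN : S.Nodup) (t : List Char) :
    solLoopA S t = (solSeenB S [] t).isPrefixOf S := by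
  simpa using solLoop_key S hN t 0 (Nat.zero_le _)

-- ===== VERDICT (by name: the statement is the Claim_ definition above) =====
theorem solution_spec : Claim_equal_solution := by
  intro skill skill_trees _ hpre
  unfold Spec_solution solution solution_alt
  have hstep :
      (fun (answer : Int) (tree : String) =>
        if solLoopA skill.toList tree.toList then answer + 1 else answer) =
      (fun (answer : Int) (tree : String) =>
        if (solSeenB skill.toList [] tree.toList).isPrefixOf skill.toList
        then answer + 1 else answer) := by
    funext answer tree
    rw [solLoop_zero skill.toList hpre tree.toList]
  rw [hstep]
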